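-- pv_equiv track=rewrite | github.com/schamori/foundation_model- | src/data/read_phases.py | match_video_to_dir
-- ===== SOURCE A (Python) =====
-- def _prefix_key(name: str) -> str:
--     """Extract prefix before first underscore (or whole name)."""
--     idx = name.find("_")
--     return name[:idx] if idx > 0 else name
--
-- def match_video_to_dir(
--     name: str,
--     dataset: str | None,
--     available_keys: list[str],
-- ) -> str | None:
--     """Match a phase-label video name to an extracted video directory key.
--
--     Tries: exact match on dir name, then prefix match, then contains.
--     """
--     name_lower = name.lower()
--     prefix = _prefix_key(name).lower()
--
--     # Try exact match on last path component
--     for key in available_keys: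
--         dir_name = key.rsplit("/", 1)[-1].lower()
--         if dir_name == name_lower:
--             return key
--
--     # Prefix match (RS-034 matches RS-034_vestibular_schwannoma_...)
--     for key in available_keys:
--         dir_name = key.rsplit("/", 1)[-1].lower()
--         if dir_name.startswith(prefix + "_") or dir_name.startswith(prefix + "-"):
--             return key
--         if name_lower in dir_name:
--             return key
--
--     return None
-- ===== SOURCE B (Python) =====
-- def match_video_to_dir(
--     name: str,
--     dataset: str | None,
--     available_keys: list[str],
-- ) -> str | None:
--     """Single pass: return first exact match; remember the first
--     prefix/contains match as a fallback and return it if no exact match."""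
--     name_lower = name.lower()
--     idx = name.find("_")
--     prefix = (name[:idx] if idx > 0 else name).lower()
--
--     fallback = None
--     for key in available_keys:
--         dir_name = key.rsplit("/", 1)[-1].lower()
--         if dir_name == name_lower:
--             return key
--         if fallback is None and (
--             dir_name.startswith(prefix + "_")
--             or dir_name.startswith(prefix + "-")
--             or name_lower in dir_name
--         ):
--             fallback = key
--     return fallback
-- ===== Notes on version B (the rewrite author's own statement) =====
-- stated objective: simpler
-- what changed: A's two separate scans over available_keys (one for exact matches, one for prefix/contains matches) are fused into a single pass that returns on the first exact match and keeps the first prefix/contains hit in a fallback variable returned after the loop.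
import Mathlib
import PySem

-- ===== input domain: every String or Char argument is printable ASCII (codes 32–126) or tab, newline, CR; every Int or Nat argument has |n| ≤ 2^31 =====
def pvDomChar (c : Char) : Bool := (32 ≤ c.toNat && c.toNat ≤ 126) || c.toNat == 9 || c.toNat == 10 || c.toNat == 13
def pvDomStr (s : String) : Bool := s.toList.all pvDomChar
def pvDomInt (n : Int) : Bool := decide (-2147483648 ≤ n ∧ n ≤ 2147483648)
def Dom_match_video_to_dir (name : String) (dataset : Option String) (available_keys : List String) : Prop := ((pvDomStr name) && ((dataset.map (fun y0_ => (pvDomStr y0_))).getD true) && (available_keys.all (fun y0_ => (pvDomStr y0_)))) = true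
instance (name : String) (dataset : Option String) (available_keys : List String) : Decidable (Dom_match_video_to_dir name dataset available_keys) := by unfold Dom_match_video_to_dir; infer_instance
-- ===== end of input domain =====

-- B fuses A's two scans over available_keys into one pass with a fallback variable (simpler; return value identical).


-- ===== PORT A =====
-- key.rsplit("/", 1)[-1] — ported via rfind: the component after the last '/' (exact, incl. no-'/' and trailing-'/')
def lastComp (key : String) : String :=
  let i := PySem.Str.rfind key "/"
  if i == -1 then key else PySem.Str.slice key (some (i + 1)) none

-- _prefix_key(name): pfx before first underscore (or whole name)
def prefixKey (name : String) : String :=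
  let idx := PySem.Str.find name "_"
  if 0 < idx then PySem.Str.slice name none (some idx) else name

-- A's first loop: exact match on last path component
def findExact (name_lower : String) : List String → Option String
  | [] => none
  | key :: rest =>
    let dir_name := PySem.Str.lower (lastComp key)
    if dir_name == name_lower then some key else findExact name_lower rest

-- A's second loop: pfx match, then contains
def findFallback (name_lower pfx : String) : List String → Option String
  | [] => none
  | key :: rest =>
    let dir_name := PySem.Str.lower (lastComp key)
    if PySem.Str.startswith dir_name (pfx ++ "_") || PySem.Str.startswith dir_name (pfx ++ "-") then
      some key
    else if PySem.Str.isIn name_lower dir_name then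
      some key
    else findFallback name_lower pfx rest

def match_video_to_dir (name : String) (dataset : Option String) (available_keys : List String) : Option String :=
  let name_lower := PySem.Str.lower name
  let pfx := PySem.Str.lower (prefixKey name)
  match findExact name_lower available_keys with
  | some key => some key
  | none => findFallback name_lower pfx available_keys

-- ===== PORT B =====
-- B's single loop: return on exact match, remember first pfx/contains hit in `fallback`
def altLoop (name_lower pfx : String) (fallback : Option String) : List String → Option String
  | [] => fallback
  | key :: rest =>
    let dir_name := PySem.Str.lower (lastComp key)
    if dir_name == name_lower then some key
    else
      let fallback' :=
        if fallback.isNone &&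
            (PySem.Str.startswith dir_name (pfx ++ "_") ||
             PySem.Str.startswith dir_name (pfx ++ "-") ||
             PySem.Str.isIn name_lower dir_name) then some key
        else fallback
      altLoop name_lower pfx fallback' rest

def match_video_to_dir_alt (name : String) (dataset : Option String) (available_keys : List String) : Option String :=
  let name_lower := PySem.Str.lower name
  let idx := PySem.Str.find name "_"
  let pfx := PySem.Str.lower (if 0 < idx then PySem.Str.slice name none (some idx) else name)
  altLoop name_lower pfx none available_keys

-- ===== PRECONDITION & SPEC =====
def Spec_match_video_to_dir (name : String) (dataset : Option String) (available_keys : List String) (out : Option String) : Prop := out = match_video_to_dir_alt name dataset available_keys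
instance (name : String) (dataset : Option String) (available_keys : List String) (out : Option String) : Decidable (Spec_match_video_to_dir name dataset available_keys out) := by unfold Spec_match_video_to_dir; infer_instance

-- ===== CLAIM (what is proved, stated in full; the proofs are below) =====
def Claim_equal_match_video_to_dir : Prop := ∀ (name : String) (dataset : Option String) (available_keys : List String), Dom_match_video_to_dir name dataset available_keys → Spec_match_video_to_dir name dataset available_keys (match_video_to_dir name dataset available_keys)

-- ===== LEMMAS AND PROOFS =====
-- Loop invariant: B's fused loop equals "first exact match, else pending fallback, else A's second scan".
theorem altLoop_eq (name_lower pfx : String) (keys : List String) :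
    ∀ fb : Option String,
      altLoop name_lower pfx fb keys =
        match findExact name_lower keys with
        | some k => some k
        | none =>
          match fb with
          | some f => some f
          | none => findFallback name_lower pfx keys := by
  induction keys with
  | nil => intro fb; cases fb <;> rfl
  | cons key rest ih =>
    intro fb
    simp only [altLoop, findExact, findFallback]
    cases hx : (PySem.Str.lower (lastComp key) == name_lower) with
    | true => rfl
    | false =>
      rw [ih]
      cases fb with
      | some f => rfl
      | none =>
        cases h1 : PySem.Str.startswith (PySem.Str.lower (lastComp key)) (pfx ++ "_") <;>
          cases h2 : PySem.Str.startswith (PySem.Str.lower (lastComp key)) (pfx ++ "-") <;>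
          cases h3 : PySem.Str.isIn name_lower (PySem.Str.lower (lastComp key)) <;>
          cases findExact name_lower rest <;> rfl

-- ===== VERDICT (by name: the statement is the Claim_ definition above) =====
theorem match_video_to_dir_spec : Claim_equal_match_video_to_dir := by
  intro name dataset available_keys _
  unfold Spec_match_video_to_dir match_video_to_dir match_video_to_dir_alt prefixKey
  rw [altLoop_eq]
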